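-- pv_equiv track=rewrite | github.com/archanray/codiing_practice | split_array_with_condition_microsoft.py | computeSums
-- ===== SOURCE A (Python) =====
-- def computeSums(nums):
--     n = len(nums)
--     leftSums = [0] * n
--     rightSums = [0] * n
--     leftSums[0] = nums[0]
--     for i in range(1,n):
--         leftSums[i] = leftSums[i-1] + nums[i]
--     for j in range(n-2,-1,-1):
--         rightSums[j] = rightSums[j+1] + nums[j+1]
--     return leftSums, rightSums
-- ===== SOURCE B (Python) =====
-- def computeSums(nums):
--     leftSums = []
--     s = 0
--     for x in nums:
--         s += x
--         leftSums.append(s)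
--     total = leftSums[-1]
--     rightSums = [total - v for v in leftSums]
--     return leftSums, rightSums
-- ===== Notes on version B (the rewrite author's own statement) =====
-- stated objective: simpler
-- what changed: B accumulates the prefix sums in one forward pass into a growing list and derives each suffix sum as total - leftSums[j], eliminating A's preallocated zero arrays, the index-based forward loop and the backward indexed loop entirely.
import Mathlib
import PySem

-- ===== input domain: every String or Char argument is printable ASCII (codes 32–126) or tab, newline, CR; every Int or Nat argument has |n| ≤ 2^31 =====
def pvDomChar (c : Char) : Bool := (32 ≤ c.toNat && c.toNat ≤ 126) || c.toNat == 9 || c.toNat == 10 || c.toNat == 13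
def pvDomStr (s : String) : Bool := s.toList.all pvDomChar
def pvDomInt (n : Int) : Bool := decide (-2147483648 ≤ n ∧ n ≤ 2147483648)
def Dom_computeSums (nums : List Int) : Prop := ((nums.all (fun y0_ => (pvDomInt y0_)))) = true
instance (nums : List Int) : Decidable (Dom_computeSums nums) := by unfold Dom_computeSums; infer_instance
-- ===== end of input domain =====

-- B computes the prefix sums by one forward accumulation into a growing list and derives
-- each suffix sum as total - leftSums[j]; objective: simpler (no preallocated zero arrays,
-- no index-based forward loop, no backward loop).

-- ===== PORT A =====
def computeSums (nums : List Int) : List Int × List Int :=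
  let n : Int := nums.length
  let leftSums0 : List Int := List.replicate nums.length 0
  let rightSums0 : List Int := List.replicate nums.length 0
  -- leftSums[0] = nums[0]; Python raises IndexError on [], excluded by Pre_
  let leftSums1 := leftSums0.set 0 (PySem.List.pyGetD nums 0 0)
  let leftSums := (PySem.List.pyRange 1 n 1).foldl
      (fun ls i => ls.set i.toNat (PySem.List.pyGetD ls (i - 1) 0 + PySem.List.pyGetD nums i 0))
      leftSums1
  let rightSums := (PySem.List.pyRange (n - 2) (-1) (-1)).foldl
      (fun rs j => rs.set j.toNat (PySem.List.pyGetD rs (j + 1) 0 + PySem.List.pyGetD nums (j + 1) 0))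
      rightSums0
  (leftSums, rightSums)

-- ===== PORT B =====
def computeSums_alt (nums : List Int) : List Int × List Int :=
  let leftSums := (nums.foldl (fun (p : List Int × Int) x => (p.1 ++ [p.2 + x], p.2 + x)) ([], 0)).1
  -- leftSums[-1]; Python raises IndexError on [], excluded by Pre_
  let total := PySem.List.pyGetD leftSums (-1) 0
  let rightSums := leftSums.map (fun v => total - v)
  (leftSums, rightSums)

-- ===== PRECONDITION & SPEC =====
-- Pre_ excludes only the empty list, on which A (and B) raise IndexError.
def Pre_computeSums (nums : List Int) : Prop := nums ≠ []
instance (nums : List Int) : Decidable (Pre_computeSums nums) := by unfold Pre_computeSums; infer_instance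
def pvWitness_computeSums : List Int := [3, -1, 4]

def Spec_computeSums (nums : List Int) (out : List Int × List Int) : Prop := out = computeSums_alt nums
instance (nums : List Int) (out : List Int × List Int) : Decidable (Spec_computeSums nums out) := by unfold Spec_computeSums; infer_instance

-- ===== CLAIM (what is proved, stated in full; the proofs are below) =====
def Claim_equal_computeSums : Prop := ∀ (nums : List Int), Dom_computeSums nums → Pre_computeSums nums → Spec_computeSums nums (computeSums nums)

-- ===== LEMMAS AND PROOFS =====

-- prefix sum through index k, suffix sum from index k+1
def preS (nums : List Int) (k : Nat) : Int := (nums.take (k + 1)).sum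
def sufS (nums : List Int) (k : Nat) : Int := (nums.drop (k + 1)).sum

theorem preS_succ (nums : List Int) (k : Nat) (h : k + 1 < nums.length) :
    preS nums (k + 1) = preS nums k + nums.getD (k + 1) 0 := by
  simp [preS, List.take_add_one, List.getD_eq_getElem?_getD, List.getElem?_eq_getElem h]
  ring

theorem sufS_pred (nums : List Int) (k : Nat) (h : k + 1 < nums.length) :
    sufS nums k = sufS nums (k + 1) + nums.getD (k + 1) 0 := by
  have hd : nums.drop (k + 1) = nums[k + 1] :: nums.drop (k + 1 + 1) := by
    rw [List.drop_eq_getElem_cons h]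
  simp only [sufS, hd, List.sum_cons, List.getD_eq_getElem?_getD,
    List.getElem?_eq_getElem h, Option.getD_some]
  ring

theorem preS_add_sufS (nums : List Int) (k : Nat) :
    preS nums k + sufS nums k = nums.sum := by
  unfold preS sufS
  rw [List.sum_take_add_sum_drop]

-- writing / reading at the seam of an append
theorem set_len_append (l₁ : List Int) (x v : Int) (l₂ : List Int) :
    (l₁ ++ x :: l₂).set l₁.length v = l₁ ++ v :: l₂ := by
  induction l₁ with
  | nil => simp
  | cons a t ih => simp [ih]

theorem set_len_append' (l₁ : List Int) (x v : Int) (l₂ : List Int) (n : Nat)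
    (h : n = l₁.length) : (l₁ ++ x :: l₂).set n v = l₁ ++ v :: l₂ := by
  subst h; exact set_len_append l₁ x v l₂

theorem pyGetD_len_append (l₁ : List Int) (x : Int) (l₂ : List Int) (d : Int) :
    PySem.List.pyGetD (l₁ ++ x :: l₂) (l₁.length : Int) d = x := by
  rw [PySem.List.pyGetD_natCast]
  rw [List.getD_eq_getElem?_getD, List.getElem?_append_right (Nat.le_refl _)]
  simp

-- B's accumulation loop builds the prefix-sum list
theorem alt_fold (nums : List Int) : ∀ (acc : List Int) (s : Int),
    nums.foldl (fun (p : List Int × Int) x => (p.1 ++ [p.2 + x], p.2 + x)) (acc, s)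
      = (acc ++ (List.range nums.length).map (fun k => s + preS nums k), s + nums.sum) := by
  induction nums with
  | nil => intro acc s; simp
  | cons x t ih =>
    intro acc s
    rw [List.foldl_cons, ih (acc ++ [s + x]) (s + x), List.length_cons,
        List.range_succ_eq_map]
    simp only [List.map_cons, List.map_map, Prod.mk.injEq]
    have h0 : preS (x :: t) 0 = x := by simp [preS]
    have hs : ∀ k : Nat, preS (x :: t) (k + 1) = x + preS t k := by
      intro k; simp [preS]
    constructor
    · simp only [List.append_assoc, List.singleton_append, h0]
      congr 1
      congr 1
      apply List.map_congr_left
      intro k _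
      simp only [Function.comp_apply, Nat.succ_eq_add_one, hs]
      ring
    · simp only [List.sum_cons]
      ring

-- A's forward loop maintains the prefix-sum prefix
theorem a_left_fold (nums : List Int) (hne : nums ≠ []) : ∀ (k : Nat), 1 ≤ k → k ≤ nums.length →
    (PySem.List.pyRange 1 (k : Int) 1).foldl
      (fun ls i => ls.set i.toNat (PySem.List.pyGetD ls (i - 1) 0 + PySem.List.pyGetD nums i 0))
      ((List.replicate nums.length 0).set 0 (PySem.List.pyGetD nums 0 0))
    = (List.range k).map (preS nums) ++ List.replicate (nums.length - k) 0 := by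
  intro k
  induction k with
  | zero => intro h; exact absurd h (by omega)
  | succ k ih =>
    intro _ hkn
    by_cases hk0 : k = 0
    · subst hk0
      obtain ⟨a, t, rfl⟩ := List.exists_cons_of_ne_nil hne
      simp [PySem.List.pyRange_one_eq_nil, List.replicate_succ, preS]
    · have hk1 : 1 ≤ k := Nat.one_le_iff_ne_zero.mpr hk0
      have hc : ((k + 1 : Nat) : Int) = (k : Int) + 1 := by push_cast; ring
      rw [hc, PySem.List.pyRange_one_succ_right (by omega), List.foldl_append,
          ih hk1 (by omega), List.foldl_cons, List.foldl_nil]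
      have hkeq : k = (k - 1) + 1 := by omega
      have hrange : List.range k = List.range (k - 1) ++ [k - 1] := by
        conv_lhs => rw [hkeq, List.range_succ]
      have hrep : List.replicate (nums.length - k) (0 : Int)
          = 0 :: List.replicate (nums.length - (k + 1)) 0 := by
        have h6 : nums.length - k = (nums.length - (k + 1)) + 1 := by omega
        rw [h6, List.replicate_succ]
      rw [hrange, List.map_append, List.map_singleton, hrep, List.append_assoc,
          List.singleton_append]
      have hread : PySem.List.pyGetD
          ((List.range (k - 1)).map (preS nums) ++ preS nums (k - 1) ::
            (0 :: List.replicate (nums.length - (k + 1)) 0)) ((k : Int) - 1) 0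
          = preS nums (k - 1) := by
        have hidx : (k : Int) - 1 = (((List.range (k - 1)).map (preS nums)).length : Int) := by
          simp; omega
        rw [hidx, pyGetD_len_append]
      rw [hread, PySem.List.pyGetD_natCast]
      have hval : preS nums (k - 1) + nums.getD k 0 = preS nums k := by
        have h7 := preS_succ nums (k - 1) (by omega)
        rw [← hkeq] at h7
        exact h7.symm
      rw [hval, Int.toNat_natCast]
      have hpre : (List.range (k - 1)).map (preS nums) ++ preS nums (k - 1) ::
            (0 :: List.replicate (nums.length - (k + 1)) 0)
          = ((List.range (k - 1)).map (preS nums) ++ [preS nums (k - 1)]) ++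
            (0 :: List.replicate (nums.length - (k + 1)) 0) := by
        simp
      rw [hpre, set_len_append' _ 0 (preS nums k) _ k (by simp; omega)]
      rw [List.range_succ, List.map_append, List.map_singleton, hrange,
          List.map_append, List.map_singleton]
      simp

-- A's backward loop fills the suffix sums from the right
theorem a_right_fold (nums : List Int) : ∀ (m : Nat), m + 1 ≤ nums.length →
    (PySem.List.pyRange ((m : Int) - 1) (-1) (-1)).foldl
      (fun rs j => rs.set j.toNat (PySem.List.pyGetD rs (j + 1) 0 + PySem.List.pyGetD nums (j + 1) 0))
      (List.replicate m 0 ++ (List.range (nums.length - m)).map (fun k => sufS nums (m + k)))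
    = (List.range nums.length).map (sufS nums) := by
  intro m
  induction m with
  | zero =>
    intro _
    simp [PySem.List.pyRange_neg_one_eq_nil]
  | succ m ih =>
    intro h
    have hc : ((m + 1 : Nat) : Int) - 1 = (m : Int) := by push_cast; ring
    rw [hc, PySem.List.pyRange_neg_one_cons (by omega), List.foldl_cons]
    have hT : (List.range (nums.length - (m + 1))).map (fun k => sufS nums (m + 1 + k))
        = sufS nums (m + 1) :: (List.range (nums.length - (m + 1) - 1)).map
            (fun k => sufS nums (m + 1 + (k + 1))) := by
      have h6 : nums.length - (m + 1) = (nums.length - (m + 1) - 1) + 1 := by omega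
      rw [h6, List.range_succ_eq_map, List.map_cons, List.map_map]
      simp [Function.comp]
    rw [hT]
    have hread : PySem.List.pyGetD
        (List.replicate (m + 1) (0 : Int) ++ sufS nums (m + 1) ::
          (List.range (nums.length - (m + 1) - 1)).map (fun k => sufS nums (m + 1 + (k + 1))))
        ((m : Int) + 1) 0 = sufS nums (m + 1) := by
      have hidx : (m : Int) + 1 = ((List.replicate (m + 1) (0 : Int)).length : Int) := by
        simp
      rw [hidx, pyGetD_len_append]
    rw [hread]
    have hc2 : (m : Int) + 1 = ((m + 1 : Nat) : Int) := by push_cast; ring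
    rw [hc2, PySem.List.pyGetD_natCast]
    have hval : sufS nums (m + 1) + nums.getD (m + 1) 0 = sufS nums m :=
      (sufS_pred nums m (by omega)).symm
    rw [hval]
    have h1 : List.replicate (m + 1) (0 : Int) ++ sufS nums (m + 1) ::
          (List.range (nums.length - (m + 1) - 1)).map (fun k => sufS nums (m + 1 + (k + 1)))
        = List.replicate m (0 : Int) ++ (0 : Int) :: (sufS nums (m + 1) ::
          (List.range (nums.length - (m + 1) - 1)).map (fun k => sufS nums (m + 1 + (k + 1)))) := by
      rw [List.replicate_succ', List.append_assoc, List.singleton_append]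
    rw [h1, Int.toNat_natCast, set_len_append' _ 0 (sufS nums m) _ m (by simp)]
    have hpeel : (List.range (nums.length - m)).map (fun k => sufS nums (m + k))
        = sufS nums m :: (List.range (nums.length - (m + 1))).map
            (fun k => sufS nums (m + 1 + k)) := by
      have h2 : nums.length - m = (nums.length - (m + 1)) + 1 := by omega
      rw [h2, List.range_succ_eq_map, List.map_cons, List.map_map]
      refine congrArg₂ List.cons (by simp) ?_
      apply List.map_congr_left
      intro k _
      simp only [Function.comp_apply, Nat.succ_eq_add_one]
      congr 1
      omega
    have hstep : List.replicate m (0 : Int) ++ sufS nums m :: (sufS nums (m + 1) ::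
          (List.range (nums.length - (m + 1) - 1)).map (fun k => sufS nums (m + 1 + (k + 1))))
        = List.replicate m 0 ++ (List.range (nums.length - m)).map (fun k => sufS nums (m + k)) := by
      rw [hpeel, hT]
    rw [hstep]
    exact ih (by omega)

-- characterizations of both ports
theorem B_char (nums : List Int) (hne : nums ≠ []) :
    computeSums_alt nums = ((List.range nums.length).map (preS nums),
      (List.range nums.length).map (sufS nums)) := by
  have hn : 1 ≤ nums.length := List.length_pos_of_ne_nil hne
  simp only [computeSums_alt]
  rw [alt_fold nums [] 0]
  simp only [List.nil_append, zero_add]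
  have hlast : PySem.List.pyGetD ((List.range nums.length).map (preS nums)) (-1) 0
      = nums.sum := by
    have h1 : nums.length = (nums.length - 1) + 1 := by omega
    rw [h1, List.range_succ, List.map_append, List.map_singleton,
        PySem.List.pyGetD_neg_one_append_singleton]
    unfold preS
    rw [← h1, List.take_length]
  rw [hlast]
  congr 1
  rw [List.map_map]
  apply List.map_congr_left
  intro k _
  simp only [Function.comp_apply]
  have h8 := preS_add_sufS nums k
  omega

theorem A_char (nums : List Int) (hne : nums ≠ []) :
    computeSums nums = ((List.range nums.length).map (preS nums),
      (List.range nums.length).map (sufS nums)) := by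
  have hn : 1 ≤ nums.length := List.length_pos_of_ne_nil hne
  simp only [computeSums]
  rw [a_left_fold nums hne nums.length hn (le_refl _)]
  have hr := a_right_fold nums (nums.length - 1) (by omega)
  have e1 : ((nums.length - 1 : Nat) : Int) - 1 = (nums.length : Int) - 2 := by omega
  have e2 : List.replicate (nums.length - 1) (0 : Int) ++
      (List.range (nums.length - (nums.length - 1))).map (fun k => sufS nums (nums.length - 1 + k))
      = List.replicate nums.length 0 := by
    have h3 : nums.length - (nums.length - 1) = 1 := by omega
    rw [h3, List.range_one, List.map_singleton]
    have h4 : sufS nums (nums.length - 1 + 0) = 0 := by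
      unfold sufS
      have h5 : nums.length - 1 + 0 + 1 = nums.length := by omega
      rw [h5, List.drop_length, List.sum_nil]
    rw [h4, ← List.replicate_succ']
    congr 1
    omega
  rw [e1, e2] at hr
  rw [hr]
  simp

-- ===== VERDICT (by name: the statement is the Claim_ definition above) =====
theorem computeSums_spec : Claim_equal_computeSums := by
  intro nums _ hpre
  show computeSums nums = computeSums_alt nums
  rw [A_char nums hpre, B_char nums hpre]
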